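-- pv_equiv track=rewrite | github.com/SuperOptimizer/villa | vesuvius/src/vesuvius/models/run/blending.py | calculate_chunks
-- ===== SOURCE A (Python) =====
-- def calculate_chunks(volume_shape, output_chunks=None, z_range=None):
--
--     Z, Y, X = volume_shape
--
--     if output_chunks is None:
--         z_chunk, y_chunk, x_chunk = 256, 256, 256
--     else:
--         z_chunk, y_chunk, x_chunk = output_chunks
--
--     chunks = []
--     for z_start in range(0, Z, z_chunk):
--         for y_start in range(0, Y, y_chunk):
--             for x_start in range(0, X, x_chunk):
--                 z_end = min(z_start + z_chunk, Z)
--                 y_end = min(y_start + y_chunk, Y)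
--                 x_end = min(x_start + x_chunk, X)
--
--                 # Apply Z-range filtering if specified
--                 if z_range is not None:
--                     range_z_start, range_z_end = z_range
--                     # Only include chunks whose end is inside the range
--                     if not (range_z_start < z_end and range_z_end >= z_end):
--                         continue  # Skip chunks outside the Z-range
--
--                 chunks.append({
--                     'z_start': z_start, 'z_end': z_end,
--                     'y_start': y_start, 'y_end': y_end,
--                     'x_start': x_start, 'x_end': x_end
--                 })
--
--     return chunks
-- ===== SOURCE B (Python) =====
-- def calculate_chunks(volume_shape, output_chunks=None, z_range=None):
--     Z, Y, X = volume_shape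
--     zc, yc, xc = (256, 256, 256) if output_chunks is None else output_chunks
--
--     # number of blocks per axis: len(range(0, n, s)) == max(0, ceil(n / s))
--     nz = max(0, -(-Z // zc))
--     ny = max(0, -(-Y // yc))
--     nx = max(0, -(-X // xc))
--
--     # z blocks that survive the optional z-range filter
--     kept = []
--     for iz in range(nz):
--         zs = iz * zc
--         ze = min(zs + zc, Z)
--         if z_range is None or (z_range[0] < ze and z_range[1] >= ze):
--             kept.append((zs, ze))
--
--     # one flat loop over a linear chunk index, decoded by divmod
--     out = []
--     for k in range(len(kept) * ny * nx):
--         izk, rem = divmod(k, ny * nx)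
--         iy, ix = divmod(rem, nx)
--         zs, ze = kept[izk]
--         ys = iy * yc
--         xs = ix * xc
--         out.append({'z_start': zs, 'z_end': ze,
--                     'y_start': ys, 'y_end': min(ys + yc, Y),
--                     'x_start': xs, 'x_end': min(xs + xc, X)})
--     return out
-- ===== Notes on version B (the rewrite author's own statement) =====
-- stated objective: alternative
-- what changed: B replaces A's three nested range loops (with the z-filter tested in the innermost body) by closed-form per-axis block counts via ceiling division, a single pass building the filtered z-block list, and one flat loop over a linear chunk index decoded with divmod.
-- outside the precondition, e.g. on calculate_chunks((0, 5, 5), (2, 0, 2), None): A returns [], B raises ZeroDivisionError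
import Mathlib
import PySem

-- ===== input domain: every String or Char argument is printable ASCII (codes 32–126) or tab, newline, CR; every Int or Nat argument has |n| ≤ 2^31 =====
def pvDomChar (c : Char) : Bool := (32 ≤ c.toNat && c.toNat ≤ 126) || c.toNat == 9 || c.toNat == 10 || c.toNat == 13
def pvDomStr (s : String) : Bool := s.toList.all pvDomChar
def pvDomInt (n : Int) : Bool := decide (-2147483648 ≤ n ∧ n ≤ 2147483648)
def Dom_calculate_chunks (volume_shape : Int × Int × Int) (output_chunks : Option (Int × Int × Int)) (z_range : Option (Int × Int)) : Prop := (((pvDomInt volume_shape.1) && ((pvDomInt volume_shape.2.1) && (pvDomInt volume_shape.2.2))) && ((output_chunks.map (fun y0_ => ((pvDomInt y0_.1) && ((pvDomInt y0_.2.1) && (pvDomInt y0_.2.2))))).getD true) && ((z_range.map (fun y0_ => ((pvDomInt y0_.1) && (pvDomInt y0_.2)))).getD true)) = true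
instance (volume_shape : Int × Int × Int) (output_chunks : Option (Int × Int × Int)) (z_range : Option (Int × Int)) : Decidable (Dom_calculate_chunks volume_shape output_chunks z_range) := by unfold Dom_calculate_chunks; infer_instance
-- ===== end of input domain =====

-- B replaces A's three nested loops (filter innermost) by closed-form per-axis block counts,
-- one pass building the filtered z-block list, and one flat loop over a linear index decoded by divmod.

-- ===== PORT A =====
-- Python's chunks list with O(1) .append is ported as an Array accumulator (push), read out with .toList.
def calculate_chunks (volume_shape : Int × Int × Int) (output_chunks : Option (Int × Int × Int)) (z_range : Option (Int × Int)) : List (List (String × Int)) :=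
  let Z := volume_shape.1
  let Y := volume_shape.2.1
  let X := volume_shape.2.2
  let c := match output_chunks with
    | none => ((256 : Int), (256 : Int), (256 : Int))
    | some t => t
  let z_chunk := c.1
  let y_chunk := c.2.1
  let x_chunk := c.2.2
  ((PySem.List.pyRange 0 Z z_chunk).foldl (fun chunks z_start =>
    (PySem.List.pyRange 0 Y y_chunk).foldl (fun chunks y_start =>
      (PySem.List.pyRange 0 X x_chunk).foldl (fun chunks x_start =>
        let z_end := min (z_start + z_chunk) Z
        let y_end := min (y_start + y_chunk) Y
        let x_end := min (x_start + x_chunk) X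
        match z_range with
        | some (range_z_start, range_z_end) =>
          if !(decide (range_z_start < z_end) && decide (range_z_end ≥ z_end)) then
            chunks  -- continue: skip chunks outside the Z-range
          else
            chunks.push [("z_start", z_start), ("z_end", z_end),
                         ("y_start", y_start), ("y_end", y_end),
                         ("x_start", x_start), ("x_end", x_end)]
        | none =>
            chunks.push [("z_start", z_start), ("z_end", z_end),
                         ("y_start", y_start), ("y_end", y_end),
                         ("x_start", x_start), ("x_end", x_end)]) chunks) chunks) #[]).toList

-- ===== PORT B =====
def calculate_chunks_alt (volume_shape : Int × Int × Int) (output_chunks : Option (Int × Int × Int)) (z_range : Option (Int × Int)) : List (List (String × Int)) :=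
  let Z := volume_shape.1
  let Y := volume_shape.2.1
  let X := volume_shape.2.2
  let c := match output_chunks with
    | none => ((256 : Int), (256 : Int), (256 : Int))
    | some t => t
  let zc := c.1
  let yc := c.2.1
  let xc := c.2.2
  -- len(range(0, n, s)) == max(0, -(-n // s))
  let nz : Int := max 0 (-(PySem.Int.floordiv (-Z) zc))
  let ny : Int := max 0 (-(PySem.Int.floordiv (-Y) yc))
  let nx : Int := max 0 (-(PySem.Int.floordiv (-X) xc))
  let kept := (PySem.List.pyRange 0 nz 1).foldl (fun kept iz =>
    let zs := iz * zc
    let ze := min (zs + zc) Z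
    if (match z_range with
        | none => true
        | some (rs, re) => decide (rs < ze) && decide (re ≥ ze)) then
      kept ++ [(zs, ze)]
    else kept) []
  -- flat loop; Python's divmod and kept[izk] are in range whenever the body runs,
  -- so the .getD defaults below are unreachable (divisor > 0, index < len(kept))
  (PySem.List.pyRange 0 ((kept.length : Int) * ny * nx) 1).foldl (fun out k =>
    let d1 := (PySem.Int.divmod? k (ny * nx)).getD (0, 0)
    let d2 := (PySem.Int.divmod? d1.2 nx).getD (0, 0)
    let zb := PySem.List.pyGetD kept d1.1 ((0 : Int), (0 : Int))
    let ys := d2.1 * yc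
    let xs := d2.2 * xc
    out ++ [[("z_start", zb.1), ("z_end", zb.2),
             ("y_start", ys), ("y_end", min (ys + yc) Y),
             ("x_start", xs), ("x_end", min (xs + xc) X)]]) []

-- ===== PRECONDITION & SPEC =====
-- Pre_ excludes output_chunks with a zero component, on which Python's range(…, 0) raises
-- ValueError; on degenerate shapes A may return [] before reaching the zero step while B raises.
def Pre_calculate_chunks (volume_shape : Int × Int × Int) (output_chunks : Option (Int × Int × Int)) (z_range : Option (Int × Int)) : Prop :=
  (match output_chunks with
   | none => true
   | some t => !(t.1 == 0) && !(t.2.1 == 0) && !(t.2.2 == 0)) = true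
instance (volume_shape : Int × Int × Int) (output_chunks : Option (Int × Int × Int)) (z_range : Option (Int × Int)) : Decidable (Pre_calculate_chunks volume_shape output_chunks z_range) := by unfold Pre_calculate_chunks; infer_instance
def pvWitness_calculate_chunks : (Int × Int × Int) × (Option (Int × Int × Int)) × (Option (Int × Int)) := ((5, 4, 3), some (2, 2, 2), some (0, 5))

def Spec_calculate_chunks (volume_shape : Int × Int × Int) (output_chunks : Option (Int × Int × Int)) (z_range : Option (Int × Int)) (out : List (List (String × Int))) : Prop := out = calculate_chunks_alt volume_shape output_chunks z_range
instance (volume_shape : Int × Int × Int) (output_chunks : Option (Int × Int × Int)) (z_range : Option (Int × Int)) (out : List (List (String × Int))) : Decidable (Spec_calculate_chunks volume_shape output_chunks z_range out) := by unfold Spec_calculate_chunks; infer_instance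

-- ===== CLAIM (what is proved, stated in full; the proofs are below) =====
def Claim_equal_calculate_chunks : Prop := ∀ (volume_shape : Int × Int × Int) (output_chunks : Option (Int × Int × Int)) (z_range : Option (Int × Int)), Dom_calculate_chunks volume_shape output_chunks z_range → Pre_calculate_chunks volume_shape output_chunks z_range → Spec_calculate_chunks volume_shape output_chunks z_range (calculate_chunks volume_shape output_chunks z_range)

-- ===== LEMMAS AND PROOFS =====

-- ceiling division -((-n) // s) via PySem floordiv, and range(0,n,s) as a map over List.range
theorem pv_ceil (n s : Int) (hs : 0 < s) :
    -(PySem.Int.floordiv (-n) s) = (n + s - 1) / s := by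
  rw [PySem.Int.neg_floordiv_neg_eq_iff_of_pos hs]
  have h1 := Int.mul_ediv_add_emod (n + s - 1) s
  have h2 := Int.emod_nonneg (n + s - 1) (ne_of_gt hs)
  have h3 := Int.emod_lt_of_pos (n + s - 1) hs
  set q := (n + s - 1) / s with hq
  set r := (n + s - 1) % s with hr
  constructor
  · have h4 : (q - 1) * s = s * q - s := by ring
    rw [h4]; linarith
  · have h4 : q * s = s * q := mul_comm _ _
    rw [h4]; linarith

theorem pv_cnt_aux (n s : Int) (hpos : 0 < s) :
    (if 0 < n then ((n - 0 + s - 1) / s).toNat else 0) = (max 0 ((n + s - 1) / s)).toNat := by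
  by_cases hn : 0 < n
  · have hd : 0 ≤ (n + s - 1) / s := Int.ediv_nonneg (by omega) (le_of_lt hpos)
    have h0 : n - 0 + s - 1 = n + s - 1 := by ring
    rw [if_pos hn, h0]
    omega
  · have hd : (n + s - 1) / s ≤ 0 := by
      calc (n + s - 1) / s ≤ (s - 1) / s := Int.ediv_le_ediv hpos (by omega)
      _ = 0 := Int.ediv_eq_zero_of_lt (by omega) (by omega)
    rw [if_neg hn]
    omega

theorem pv_count (n s : Int) (hs : s ≠ 0) :
    PySem.List.pyRange 0 n s
      = (List.range (max 0 (-(PySem.Int.floordiv (-n) s))).toNat).map (fun k : Nat => (k : Int) * s) := by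
  rcases lt_or_gt_of_ne hs with hneg | hpos
  · have hflip : PySem.Int.floordiv (-n) s = PySem.Int.floordiv n (-s) := by
      simpa using PySem.Int.floordiv_neg_neg n (-s)
    have hc : -(PySem.Int.floordiv n (-s)) = (-n + -s - 1) / (-s) := by
      have := pv_ceil (-n) (-s) (by omega)
      simpa using this
    have haux := pv_cnt_aux (-n) (-s) (by omega)
    have h1 : -n - 0 + -s - 1 = 0 - n + -s - 1 := by ring
    have h2 : (0 < -n) = (n < 0) := propext ⟨fun h => by omega, fun h => by omega⟩
    rw [h1] at haux
    simp only [h2] at haux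
    rw [PySem.List.pyRange_of_neg 0 n hneg, hflip, hc, ← haux]
    apply List.map_congr_left
    intro k _
    ring
  · rw [PySem.List.pyRange_of_pos 0 n hpos, pv_ceil n s hpos, ← pv_cnt_aux n s hpos]
    apply List.map_congr_left
    intro k _
    ring


-- a fold that never modifies its accumulator
theorem pv_foldl_id {a b : Type} (l : List a) (acc : b) :
    l.foldl (fun s _ => s) acc = acc := by
  induction l generalizing acc with
  | nil => rfl
  | cons x t ih =>
      rw [List.foldl_cons]
      exact ih acc

-- one append-loop over an Array accumulator is a map
theorem pv_arr1 {a b : Type} (xl : List a) (f : a → b) (acc : Array b) :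
    (xl.foldl (fun s x => s.push (f x)) acc).toList = acc.toList ++ xl.map f := by
  induction xl generalizing acc with
  | nil => simp
  | cons x t ih =>
      simp only [List.foldl_cons, List.map_cons]
      rw [ih]
      simp

-- two nested append-loops are a flatMap of maps
theorem pv_arr2 {a b c : Type} (yl : List a) (xl : List c) (g : a → c → b) (acc : Array b) :
    (yl.foldl (fun s y => xl.foldl (fun s x => s.push (g y x)) s) acc).toList
      = acc.toList ++ yl.flatMap (fun y => xl.map (g y)) := by
  induction yl generalizing acc with
  | nil => simp
  | cons y t ih =>
      simp only [List.foldl_cons, List.flatMap_cons]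
      rw [ih, pv_arr1]
      simp [List.append_assoc]

-- A's triple nested append-fold with the z-only test innermost equals
-- "filter the z list first, then take the full product".
theorem pv_tripleA {b : Type} (zl yl xl : List Int) (p : Int → Bool)
    (g : Int → Int → Int → b) (acc : Array b) :
    (zl.foldl (fun s z =>
      yl.foldl (fun s y =>
        xl.foldl (fun s x =>
          if !(p z) then s else s.push (g z y x)) s) s) acc).toList
      = acc.toList ++ (zl.filter p).flatMap (fun z => yl.flatMap (fun y => xl.map (g z y))) := by
  induction zl generalizing acc with
  | nil => simp
  | cons z t ih =>
      simp only [List.foldl_cons, List.filter_cons]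
      cases hp : p z with
      | false =>
          simp only [Bool.not_false, if_true, pv_foldl_id, Bool.false_eq_true, if_false]
          exact ih acc
      | true =>
          simp only [Bool.not_true, Bool.false_eq_true, if_false, if_true]
          rw [ih, pv_arr2]
          simp [List.append_assoc]

-- same without any test (z_range is None)
theorem pv_tripleA0 {b : Type} (zl yl xl : List Int)
    (g : Int → Int → Int → b) (acc : Array b) :
    (zl.foldl (fun s z =>
      yl.foldl (fun s y =>
        xl.foldl (fun s x => s.push (g z y x)) s) s) acc).toList
      = acc.toList ++ zl.flatMap (fun z => yl.flatMap (fun y => xl.map (g z y))) := by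
  induction zl generalizing acc with
  | nil => simp
  | cons z t ih =>
      simp only [List.foldl_cons]
      rw [ih, pv_arr2]
      simp [List.append_assoc]

-- divmod decode of a flat chunk index
theorem pv_decode1 {β : Type} (b c : Nat) (g : Nat → Nat → β) :
    (List.range (b * c)).map (fun k => g (k / c) (k % c))
      = (List.range b).flatMap (fun j => (List.range c).map (fun i => g j i)) := by
  induction b with
  | zero => simp
  | succ b ih =>
      rw [show (b + 1) * c = b * c + c from by ring, List.range_add, List.map_append, ih,
        List.range_succ, List.flatMap_append]
      congr 1
      rw [List.map_map]
      simp only [List.flatMap_cons, List.flatMap_nil, List.append_nil]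
      apply List.map_congr_left
      intro i hi
      have hic : i < c := List.mem_range.mp hi
      simp only [Function.comp]
      rw [show b * c + i = i + b * c from by ring]
      rw [Nat.add_mul_div_right _ _ (by omega), Nat.add_mul_mod_self_right,
        Nat.div_eq_of_lt hic, Nat.mod_eq_of_lt hic, Nat.zero_add]

theorem pv_decode2 {α β : Type} (l : List α) (n : Nat) (dflt : α) (g : α → Nat → β) :
    (List.range (l.length * n)).map (fun k => g (l.getD (k / n) dflt) (k % n))
      = l.flatMap (fun x => (List.range n).map (fun i => g x i)) := by
  induction l with
  | nil => simp
  | cons x rest ih =>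
      rw [List.length_cons, show (rest.length + 1) * n = n + rest.length * n from by ring,
        List.range_add, List.map_append, List.flatMap_cons]
      congr 1
      · apply List.map_congr_left
        intro k hk
        have hkn : k < n := List.mem_range.mp hk
        rw [Nat.div_eq_of_lt hkn, Nat.mod_eq_of_lt hkn, List.getD_cons_zero]
      · rw [List.map_map, ← ih]
        apply List.map_congr_left
        intro k hk
        have hkn : k < rest.length * n := List.mem_range.mp hk
        have hn : 0 < n := by
          rcases Nat.eq_zero_or_pos n with h | h
          · subst h; simp at hkn
          · exact h
        simp only [Function.comp]
        rw [show n + k = k + n from by ring, Nat.add_div_right _ hn, Nat.add_mod_right,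
          List.getD_cons_succ]



-- the two ports agree for explicit nonzero chunk sizes
theorem pv_main (Z Y X zc yc xc : Int) (zr : Option (Int × Int))
    (hz : zc ≠ 0) (hy : yc ≠ 0) (hx : xc ≠ 0) :
    calculate_chunks (Z, Y, X) (some (zc, yc, xc)) zr
      = calculate_chunks_alt (Z, Y, X) (some (zc, yc, xc)) zr := by
  rcases zr with _ | ⟨rs, re⟩
  · simp only [calculate_chunks, calculate_chunks_alt]
    rw [pv_tripleA0]
    simp only [if_true]
    rw [PySem.List.foldl_append_singleton_eq_map, PySem.List.foldl_append_singleton_eq_map]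
    rw [pv_count Z zc hz, pv_count Y yc hy, pv_count X xc hx]
    simp only [PySem.List.pyRange_one, List.nil_append, sub_zero, zero_add,
      List.map_map, List.flatMap_map]
    rw [show (max 0 (-PySem.Int.floordiv (-Y) yc)) = (((max 0 (-PySem.Int.floordiv (-Y) yc)).toNat : Nat) : Int) from (Int.toNat_of_nonneg (le_max_left _ _)).symm]
    rw [show (max 0 (-PySem.Int.floordiv (-X) xc)) = (((max 0 (-PySem.Int.floordiv (-X) xc)).toNat : Nat) : Int) from (Int.toNat_of_nonneg (le_max_left _ _)).symm]
    simp only [Function.comp_def, Int.toNat_natCast]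
    set NZt := (max 0 (-PySem.Int.floordiv (-Z) zc)).toNat with hNZt
    set a := (max 0 (-PySem.Int.floordiv (-Y) yc)).toNat with ha
    set b := (max 0 (-PySem.Int.floordiv (-X) xc)).toNat with hb
    have hT : ∀ (l : List (Int × Int)), ((l.length : Int) * (a : Int) * (b : Int)).toNat = l.length * (a * b) := by
      intro l
      rw [show ((l.length : Int) * (a : Int) * (b : Int)) = ((l.length * (a * b) : Nat) : Int) from by push_cast; ring, Int.toNat_natCast]
    rw [hT]
    by_cases hab : a * b = 0
    · rcases Nat.mul_eq_zero.mp hab with h0 | h0 <;> simp [h0]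
    · have hb0 : b ≠ 0 := fun h => hab (by simp [h])
      have hdm1 : ∀ k : Nat, PySem.Int.divmod? (k : Int) ((a : Int) * (b : Int)) = some ((↑(k / (a * b)) : Int), (↑(k % (a * b)) : Int)) := by
        intro k
        rw [show ((a : Int) * (b : Int)) = ((a * b : Nat) : Int) from by push_cast; ring]
        have hne : ((a * b : Nat) : Int) ≠ 0 := by exact_mod_cast hab
        have h1 : (k : Int).fdiv ((a * b : Nat) : Int) = ((k / (a * b) : Nat) : Int) := PySem.Int.floordiv_natCast k (a * b)
        have h2 : (k : Int).fmod ((a * b : Nat) : Int) = ((k % (a * b) : Nat) : Int) := PySem.Int.mod_natCast k (a * b)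
        simp only [PySem.Int.divmod?, if_neg hne, h1, h2]
      have hdm2 : ∀ r : Nat, PySem.Int.divmod? (r : Int) (b : Int) = some ((↑(r / b) : Int), (↑(r % b) : Int)) := by
        intro r
        have hne : ((b : Nat) : Int) ≠ 0 := by exact_mod_cast hb0
        have h1 : (r : Int).fdiv ((b : Nat) : Int) = ((r / b : Nat) : Int) := PySem.Int.floordiv_natCast r b
        have h2 : (r : Int).fmod ((b : Nat) : Int) = ((r % b : Nat) : Int) := PySem.Int.mod_natCast r b
        simp only [PySem.Int.divmod?, if_neg hne, h1, h2]
      simp only [hdm1, hdm2, Option.getD_some, PySem.List.pyGetD_natCast]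
      rw [pv_decode2 _ (a * b) ((0 : Int), (0 : Int)) (fun zb r =>
        [("z_start", zb.1), ("z_end", zb.2),
         ("y_start", (↑(r / b) : Int) * yc), ("y_end", min ((↑(r / b) : Int) * yc + yc) Y),
         ("x_start", (↑(r % b) : Int) * xc), ("x_end", min ((↑(r % b) : Int) * xc + xc) X)])]
      have hinner : ∀ zb : Int × Int, (List.range (a * b)).map (fun r =>
          [("z_start", zb.1), ("z_end", zb.2),
           ("y_start", (↑(r / b) : Int) * yc), ("y_end", min ((↑(r / b) : Int) * yc + yc) Y),
           ("x_start", (↑(r % b) : Int) * xc), ("x_end", min ((↑(r % b) : Int) * xc + xc) X)])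
          = (List.range a).flatMap (fun (j : Nat) => (List.range b).map (fun (i : Nat) =>
          [("z_start", zb.1), ("z_end", zb.2),
           ("y_start", (↑j : Int) * yc), ("y_end", min ((↑j : Int) * yc + yc) Y),
           ("x_start", (↑i : Int) * xc), ("x_end", min ((↑i : Int) * xc + xc) X)])) :=
        fun zb => pv_decode1 a b (fun (j : Nat) (i : Nat) =>
          [("z_start", zb.1), ("z_end", zb.2),
           ("y_start", (↑j : Int) * yc), ("y_end", min ((↑j : Int) * yc + yc) Y),
           ("x_start", (↑i : Int) * xc), ("x_end", min ((↑i : Int) * xc + xc) X)])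
      simp only [hinner]
      rw [List.flatMap_map]

  · simp only [calculate_chunks, calculate_chunks_alt]
    rw [pv_tripleA]
    rw [PySem.List.foldl_append_if]
    rw [PySem.List.foldl_append_singleton_eq_map]
    rw [pv_count Z zc hz, pv_count Y yc hy, pv_count X xc hx]
    simp only [PySem.List.pyRange_one, List.nil_append, sub_zero, zero_add,
      List.filter_map, List.map_map, List.flatMap_map]
    rw [show (max 0 (-PySem.Int.floordiv (-Y) yc)) = (((max 0 (-PySem.Int.floordiv (-Y) yc)).toNat : Nat) : Int) from (Int.toNat_of_nonneg (le_max_left _ _)).symm]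
    rw [show (max 0 (-PySem.Int.floordiv (-X) xc)) = (((max 0 (-PySem.Int.floordiv (-X) xc)).toNat : Nat) : Int) from (Int.toNat_of_nonneg (le_max_left _ _)).symm]
    simp only [Function.comp_def, Int.toNat_natCast]
    set NZt := (max 0 (-PySem.Int.floordiv (-Z) zc)).toNat with hNZt
    set a := (max 0 (-PySem.Int.floordiv (-Y) yc)).toNat with ha
    set b := (max 0 (-PySem.Int.floordiv (-X) xc)).toNat with hb
    have hT : ∀ (l : List (Int × Int)), ((l.length : Int) * (a : Int) * (b : Int)).toNat = l.length * (a * b) := by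
      intro l
      rw [show ((l.length : Int) * (a : Int) * (b : Int)) = ((l.length * (a * b) : Nat) : Int) from by push_cast; ring, Int.toNat_natCast]
    rw [hT]
    by_cases hab : a * b = 0
    · rcases Nat.mul_eq_zero.mp hab with h0 | h0 <;> simp [h0]
    · have hb0 : b ≠ 0 := fun h => hab (by simp [h])
      have hdm1 : ∀ k : Nat, PySem.Int.divmod? (k : Int) ((a : Int) * (b : Int)) = some ((↑(k / (a * b)) : Int), (↑(k % (a * b)) : Int)) := by
        intro k
        rw [show ((a : Int) * (b : Int)) = ((a * b : Nat) : Int) from by push_cast; ring]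
        have hne : ((a * b : Nat) : Int) ≠ 0 := by exact_mod_cast hab
        have h1 : (k : Int).fdiv ((a * b : Nat) : Int) = ((k / (a * b) : Nat) : Int) := PySem.Int.floordiv_natCast k (a * b)
        have h2 : (k : Int).fmod ((a * b : Nat) : Int) = ((k % (a * b) : Nat) : Int) := PySem.Int.mod_natCast k (a * b)
        simp only [PySem.Int.divmod?, if_neg hne, h1, h2]
      have hdm2 : ∀ r : Nat, PySem.Int.divmod? (r : Int) (b : Int) = some ((↑(r / b) : Int), (↑(r % b) : Int)) := by
        intro r
        have hne : ((b : Nat) : Int) ≠ 0 := by exact_mod_cast hb0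
        have h1 : (r : Int).fdiv ((b : Nat) : Int) = ((r / b : Nat) : Int) := PySem.Int.floordiv_natCast r b
        have h2 : (r : Int).fmod ((b : Nat) : Int) = ((r % b : Nat) : Int) := PySem.Int.mod_natCast r b
        simp only [PySem.Int.divmod?, if_neg hne, h1, h2]
      simp only [hdm1, hdm2, Option.getD_some, PySem.List.pyGetD_natCast]
      rw [pv_decode2 _ (a * b) ((0 : Int), (0 : Int)) (fun zb r =>
        [("z_start", zb.1), ("z_end", zb.2),
         ("y_start", (↑(r / b) : Int) * yc), ("y_end", min ((↑(r / b) : Int) * yc + yc) Y),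
         ("x_start", (↑(r % b) : Int) * xc), ("x_end", min ((↑(r % b) : Int) * xc + xc) X)])]
      have hinner : ∀ zb : Int × Int, (List.range (a * b)).map (fun r =>
          [("z_start", zb.1), ("z_end", zb.2),
           ("y_start", (↑(r / b) : Int) * yc), ("y_end", min ((↑(r / b) : Int) * yc + yc) Y),
           ("x_start", (↑(r % b) : Int) * xc), ("x_end", min ((↑(r % b) : Int) * xc + xc) X)])
          = (List.range a).flatMap (fun (j : Nat) => (List.range b).map (fun (i : Nat) =>
          [("z_start", zb.1), ("z_end", zb.2),
           ("y_start", (↑j : Int) * yc), ("y_end", min ((↑j : Int) * yc + yc) Y),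
           ("x_start", (↑i : Int) * xc), ("x_end", min ((↑i : Int) * xc + xc) X)])) :=
        fun zb => pv_decode1 a b (fun (j : Nat) (i : Nat) =>
          [("z_start", zb.1), ("z_end", zb.2),
           ("y_start", (↑j : Int) * yc), ("y_end", min ((↑j : Int) * yc + yc) Y),
           ("x_start", (↑i : Int) * xc), ("x_end", min ((↑i : Int) * xc + xc) X)])
      simp only [hinner]
      rw [List.flatMap_map]

theorem calculate_chunks_spec : Claim_equal_calculate_chunks := by
  intro vs oc zr _hDom hPre
  obtain ⟨Z, Y, X⟩ := vs
  unfold Spec_calculate_chunks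
  cases oc with
  | none =>
      have h : calculate_chunks (Z, Y, X) (some (256, 256, 256)) zr
          = calculate_chunks_alt (Z, Y, X) (some (256, 256, 256)) zr :=
        pv_main Z Y X 256 256 256 zr (by norm_num) (by norm_num) (by norm_num)
      exact h
  | some t =>
      obtain ⟨zc, yc, xc⟩ := t
      unfold Pre_calculate_chunks at hPre
      simp only [Bool.and_eq_true, Bool.not_eq_true', beq_eq_false_iff_ne] at hPre
      exact pv_main Z Y X zc yc xc zr hPre.1.1 hPre.1.2 hPre.2
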